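-- pv_equiv track=rewrite | github.com/noppakorn/COM-PROG | Homework/Prog-07/Function Test/encode_EAN13.py | digits_of
-- ===== SOURCE A (Python) =====
-- l = ['0001101', '0011001', '0010011', '0111101', '0100011', '0110001', '0101111', '0111011', '0110111', '0001011']
--
-- g = ['0100111', '0110011', '0011011', '0100001', '0011101', '0111001', '0000101', '0010001', '0001001', '0010111']
--
-- r = ['1110010', '1100110', '1101100', '1000010', '1011100', '1001110', '1010000', '1000100', '1001000', '1110100']
--
-- def digits_of(codes):
--     s,nc = '',[]
--     for i in range(len(codes)//7) : nc.append(codes[7*i:7*(i+1)])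
--     for i in nc :
--         if i in l : s += str(l.index(i))
--         elif i in g : s += str(g.index(i))
--         elif i in r : s += str(r.index(i))
--         else : return ''
--     return s
-- ===== SOURCE B (Python) =====
-- # One table only: EAN-13 symmetry gives R = bitwise complement of L and G = reverse of R,
-- # so G/R chunks are decoded by transforming into the L table; a divide-and-conquer
-- # recursion over the chunk list (None = unknown chunk anywhere) replaces A's
-- # accumulator loop over three tables.
-- l = ['0001101', '0011001', '0010011', '0111101', '0100011', '0110001', '0101111', '0111011', '0110111', '0001011']
--
-- def _comp(s):
--     return ''.join('1' if ch == '0' else '0' if ch == '1' else ch for ch in s)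
--
-- def _dec(c):
--     if c in l:
--         return str(l.index(c))
--     rc = _comp(c)
--     if rc[::-1] in l:
--         return str(l.index(rc[::-1]))
--     if rc in l:
--         return str(l.index(rc))
--     return None
--
-- def _go(chunks):
--     if not chunks:
--         return ''
--     if len(chunks) == 1:
--         return _dec(chunks[0])
--     m = len(chunks) // 2
--     a = _go(chunks[:m])
--     b = _go(chunks[m:])
--     return None if a is None or b is None else a + b
--
-- def digits_of(codes):
--     res = _go([codes[7*i:7*i+7] for i in range(len(codes)//7)])
--     return '' if res is None else res
-- ===== Notes on version B (the rewrite author's own statement) =====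
-- stated objective: alternative
-- what changed: B drops the G and R tables entirely, decoding every chunk against the single L table via the EAN-13 symmetry (R-pattern = bitwise complement of L, G-pattern = reverse of R), and assembles the digit string by divide-and-conquer recursion over the chunk list (None anywhere yields ''), instead of A's left-to-right accumulator loop over three tables.
import Mathlib
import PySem

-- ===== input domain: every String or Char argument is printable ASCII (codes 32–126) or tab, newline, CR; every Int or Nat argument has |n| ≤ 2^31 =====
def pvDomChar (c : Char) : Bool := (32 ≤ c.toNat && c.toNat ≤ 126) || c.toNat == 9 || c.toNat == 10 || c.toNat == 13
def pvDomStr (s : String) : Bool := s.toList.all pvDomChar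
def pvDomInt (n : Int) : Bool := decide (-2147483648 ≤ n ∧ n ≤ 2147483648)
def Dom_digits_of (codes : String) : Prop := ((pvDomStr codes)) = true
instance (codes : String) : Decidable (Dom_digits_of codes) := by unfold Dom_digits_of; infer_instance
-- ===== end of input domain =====

-- B keeps only the L table, decodes G/R chunks through the EAN-13 symmetry
-- (R = bitwise complement of L, G = reverse of R) and assembles the result by
-- divide-and-conquer over the chunk list (objective: alternative).

-- ===== PORT A =====
def lList : List String := ["0001101", "0011001", "0010011", "0111101", "0100011", "0110001", "0101111", "0111011", "0110111", "0001011"]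

def gList : List String := ["0100111", "0110011", "0011011", "0100001", "0011101", "0111001", "0000101", "0010001", "0001001", "0010111"]

def rList : List String := ["1110010", "1100110", "1101100", "1000010", "1011100", "1001110", "1010000", "1000100", "1001000", "1110100"]

-- the 'for i in nc' loop with accumulator s; the bare return of the empty string is the last branch
def digitsLoop : List String → String → String
  | [], s => s
  | i :: rest, s =>
    if lList.contains i then
      digitsLoop rest (s ++ PySem.Int.toStr (((PySem.List.index? lList i).getD 0 : Nat) : Int))
    else if gList.contains i then
      digitsLoop rest (s ++ PySem.Int.toStr (((PySem.List.index? gList i).getD 0 : Nat) : Int))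
    else if rList.contains i then
      digitsLoop rest (s ++ PySem.Int.toStr (((PySem.List.index? rList i).getD 0 : Nat) : Int))
    else ""

def digits_of (codes : String) : String :=
  let nc := (PySem.List.pyRange 0 (PySem.Int.floordiv (PySem.Str.len codes) 7) 1).foldl
    (fun nc i => nc ++ [PySem.Str.slice codes (some (7 * i)) (some (7 * (i + 1)))]) []
  digitsLoop nc ""

-- ===== PORT B =====
-- _comp: character-wise 0/1 complement (exact: pure per-char mapping, other chars unchanged)
def compC (ch : Char) : Char := if ch = '0' then '1' else if ch = '1' then '0' else ch
def compStr (s : String) : String := String.ofList (s.toList.map compC)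
-- rc[::-1] on a string: exact, Python's full reverse slice
def revStr (s : String) : String := String.ofList s.toList.reverse

def decDigit (c : String) : Option String :=
  if lList.contains c then
    some (PySem.Int.toStr (((PySem.List.index? lList c).getD 0 : Nat) : Int))
  else
    let rc := compStr c
    if lList.contains (revStr rc) then
      some (PySem.Int.toStr (((PySem.List.index? lList (revStr rc)).getD 0 : Nat) : Int))
    else if lList.contains rc then
      some (PySem.Int.toStr (((PySem.List.index? lList rc).getD 0 : Nat) : Int))
    else none

def goB (cs : List String) : Option String :=
  match cs with
  | [] => some ""
  | [c] => decDigit c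
  | c1 :: c2 :: rest =>
    let m := (c1 :: c2 :: rest).length / 2
    match goB ((c1 :: c2 :: rest).take m), goB ((c1 :: c2 :: rest).drop m) with
    | some a, some b => some (a ++ b)
    | _, _ => none
termination_by cs.length
decreasing_by
  · simp; omega
  · simp; omega

def digits_of_alt (codes : String) : String :=
  match goB ((PySem.List.pyRange 0 (PySem.Int.floordiv (PySem.Str.len codes) 7) 1).map
      (fun i => PySem.Str.slice codes (some (7 * i)) (some (7 * i + 7)))) with
  | none => ""
  | some s => s

-- ===== PRECONDITION & SPEC =====
def Spec_digits_of (codes : String) (out : String) : Prop := out = digits_of_alt codes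
instance (codes : String) (out : String) : Decidable (Spec_digits_of codes out) := by unfold Spec_digits_of; infer_instance

-- ===== CLAIM (what is proved, stated in full; the proofs are below) =====
def Claim_equal_digits_of : Prop := ∀ (codes : String), Dom_digits_of codes → Spec_digits_of codes (digits_of codes)

-- ===== LEMMAS AND PROOFS =====

lemma compC_invol (ch : Char) : compC (compC ch) = ch := by
  by_cases h0 : ch = '0'
  · simp [compC, h0]
  · by_cases h1 : ch = '1' <;> simp [compC, h0, h1]

lemma comp_invol (s : String) : compStr (compStr s) = s := by
  apply String.toList_inj.mp
  simp [compStr, List.map_map, Function.comp_def, compC_invol]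

lemma rev_invol (s : String) : revStr (revStr s) = s := by
  apply String.toList_inj.mp
  simp [revStr]

lemma rc_eq_iff (c p q : String) (hq : compStr (revStr p) = q) :
    revStr (compStr c) = p ↔ c = q := by
  constructor
  · intro h; rw [← hq, ← h, rev_invol, comp_invol]
  · intro h; rw [h, ← hq, comp_invol, rev_invol]

lemma comp_eq_iff (c p q : String) (hq : compStr p = q) :
    compStr c = p ↔ c = q := by
  constructor
  · intro h; rw [← hq, ← h, comp_invol]
  · intro h; rw [h, ← hq, comp_invol]

-- B's single-table decode agrees with A's three-branch cascade, for ANY chunk string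
set_option maxHeartbeats 2000000 in
lemma dec_eq (c : String) :
    decDigit c =
      (if lList.contains c then
        some (PySem.Int.toStr (((PySem.List.index? lList c).getD 0 : Nat) : Int))
      else if gList.contains c then
        some (PySem.Int.toStr (((PySem.List.index? gList c).getD 0 : Nat) : Int))
      else if rList.contains c then
        some (PySem.Int.toStr (((PySem.List.index? rList c).getD 0 : Nat) : Int))
      else none) := by
  by_cases h1 : c = "0001101"
  · subst h1; decide
  by_cases h2 : c = "0011001"
  · subst h2; decide
  by_cases h3 : c = "0010011"
  · subst h3; decide
  by_cases h4 : c = "0111101"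
  · subst h4; decide
  by_cases h5 : c = "0100011"
  · subst h5; decide
  by_cases h6 : c = "0110001"
  · subst h6; decide
  by_cases h7 : c = "0101111"
  · subst h7; decide
  by_cases h8 : c = "0111011"
  · subst h8; decide
  by_cases h9 : c = "0110111"
  · subst h9; decide
  by_cases h10 : c = "0001011"
  · subst h10; decide
  by_cases h11 : c = "0100111"
  · subst h11; decide
  by_cases h12 : c = "0110011"
  · subst h12; decide
  by_cases h13 : c = "0011011"
  · subst h13; decide
  by_cases h14 : c = "0100001"
  · subst h14; decide
  by_cases h15 : c = "0011101"
  · subst h15; decide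
  by_cases h16 : c = "0111001"
  · subst h16; decide
  by_cases h17 : c = "0000101"
  · subst h17; decide
  by_cases h18 : c = "0010001"
  · subst h18; decide
  by_cases h19 : c = "0001001"
  · subst h19; decide
  by_cases h20 : c = "0010111"
  · subst h20; decide
  by_cases h21 : c = "1110010"
  · subst h21; decide
  by_cases h22 : c = "1100110"
  · subst h22; decide
  by_cases h23 : c = "1101100"
  · subst h23; decide
  by_cases h24 : c = "1000010"
  · subst h24; decide
  by_cases h25 : c = "1011100"
  · subst h25; decide
  by_cases h26 : c = "1001110"
  · subst h26; decide
  by_cases h27 : c = "1010000"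
  · subst h27; decide
  by_cases h28 : c = "1000100"
  · subst h28; decide
  by_cases h29 : c = "1001000"
  · subst h29; decide
  by_cases h30 : c = "1110100"
  · subst h30; decide
  have hl : c ∉ lList := by
    simp [lList]; exact ⟨h1, h2, h3, h4, h5, h6, h7, h8, h9, h10⟩
  have hgc : revStr (compStr c) ∉ lList := by
    simp [lList, rc_eq_iff c "0001101" "0100111" (by decide), rc_eq_iff c "0011001" "0110011" (by decide), rc_eq_iff c "0010011" "0011011" (by decide), rc_eq_iff c "0111101" "0100001" (by decide), rc_eq_iff c "0100011" "0011101" (by decide), rc_eq_iff c "0110001" "0111001" (by decide), rc_eq_iff c "0101111" "0000101" (by decide), rc_eq_iff c "0111011" "0010001" (by decide), rc_eq_iff c "0110111" "0001001" (by decide), rc_eq_iff c "0001011" "0010111" (by decide)]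
    exact ⟨h11, h12, h13, h14, h15, h16, h17, h18, h19, h20⟩
  have hrc : compStr c ∉ lList := by
    simp [lList, comp_eq_iff c "0001101" "1110010" (by decide), comp_eq_iff c "0011001" "1100110" (by decide), comp_eq_iff c "0010011" "1101100" (by decide), comp_eq_iff c "0111101" "1000010" (by decide), comp_eq_iff c "0100011" "1011100" (by decide), comp_eq_iff c "0110001" "1001110" (by decide), comp_eq_iff c "0101111" "1010000" (by decide), comp_eq_iff c "0111011" "1000100" (by decide), comp_eq_iff c "0110111" "1001000" (by decide), comp_eq_iff c "0001011" "1110100" (by decide)]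
    exact ⟨h21, h22, h23, h24, h25, h26, h27, h28, h29, h30⟩
  have hg : c ∉ gList := by
    simp [gList]; exact ⟨h11, h12, h13, h14, h15, h16, h17, h18, h19, h20⟩
  have hr : c ∉ rList := by
    simp [rList]; exact ⟨h21, h22, h23, h24, h25, h26, h27, h28, h29, h30⟩
  simp [decDigit, hl, hgc, hrc, hg, hr]

lemma digitsLoop_cons (c : String) (rest : List String) (s : String) :
    digitsLoop (c :: rest) s =
      match decDigit c with
      | none => ""
      | some d => digitsLoop rest (s ++ d) := by
  rw [dec_eq c]
  conv_lhs => rw [digitsLoop.eq_def]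
  dsimp only
  split_ifs <;> rfl

-- linear specification of the decode: used only to relate the two programs
def seqDec : List String → Option String
  | [] => some ""
  | c :: rest =>
    match decDigit c, seqDec rest with
    | some d, some s => some (d ++ s)
    | _, _ => none

lemma seq_append (xs ys : List String) :
    seqDec (xs ++ ys) =
      match seqDec xs, seqDec ys with
      | some a, some b => some (a ++ b)
      | _, _ => none := by
  induction xs with
  | nil =>
    cases h : seqDec ys <;> simp [seqDec, h, String.empty_append]
  | cons c xs ih =>
    simp only [List.cons_append, seqDec, ih]
    cases decDigit c <;> cases seqDec xs <;> cases seqDec ys <;>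
      simp [String.append_assoc]

lemma goB_eq_seq (cs : List String) : goB cs = seqDec cs := by
  suffices H : ∀ (n : ℕ) (cs : List String), cs.length ≤ n → goB cs = seqDec cs from
    H cs.length cs le_rfl
  intro n
  induction n with
  | zero =>
    intro cs h
    have : cs = [] := List.eq_nil_of_length_eq_zero (Nat.le_zero.mp h)
    subst this
    simp [goB, seqDec]
  | succ n ih =>
    intro cs h
    match cs with
    | [] => simp [goB, seqDec]
    | [c] =>
      rw [goB]
      cases hd : decDigit c <;> simp [seqDec, hd, String.append_empty]
    | c1 :: c2 :: rest =>
      rw [goB]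
      have hT := ih ((c1 :: c2 :: rest).take ((c1 :: c2 :: rest).length / 2))
        (by simp at h ⊢; omega)
      have hD := ih ((c1 :: c2 :: rest).drop ((c1 :: c2 :: rest).length / 2))
        (by simp at h ⊢; omega)
      rw [hT, hD, ← seq_append, List.take_append_drop]

lemma loop_eq (nc : List String) (s : String) :
    digitsLoop nc s =
      match seqDec nc with
      | none => ""
      | some t => s ++ t := by
  induction nc generalizing s with
  | nil => simp [digitsLoop, seqDec]
  | cons c rest ih =>
    rw [digitsLoop_cons]
    cases h : decDigit c with
    | none => simp [seqDec, h]
    | some d =>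
      dsimp only
      rw [ih]
      cases hg : seqDec rest with
      | none => simp [seqDec, h, hg]
      | some t => simp [seqDec, h, hg, String.append_assoc]

-- ===== VERDICT (by name: the statement is the Claim_ definition above) =====
theorem digits_of_spec : Claim_equal_digits_of := by
  intro codes _
  unfold Spec_digits_of digits_of digits_of_alt
  rw [PySem.List.foldl_append_singleton_eq_map]
  have hfun : (fun i : Int => PySem.Str.slice codes (some (7 * i)) (some (7 * (i + 1)))) =
      (fun i : Int => PySem.Str.slice codes (some (7 * i)) (some (7 * i + 7))) := by
    funext i
    have h7 : 7 * (i + 1) = 7 * i + 7 := by ring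
    rw [h7]
  simp only [List.nil_append, hfun, loop_eq, goB_eq_seq]
  cases seqDec _ <;> simp [String.empty_append]
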